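-- pv_equiv track=rewrite | github.com/Shubham-Choudhury/GeeksforGeeks-Problems | 2024/03 March/Largest subsquare surrounded by X/main.py | largestSubsquare
-- ===== SOURCE A (Python) =====
-- def largestSubsquare(n, a):
--     ROWS, COLS = len(a), len(a[0])
--     dp = [[[0, 0] for i in range(ROWS + 1)] for j in range(COLS + 1)]
--
--     for i in range(ROWS):
--         for j in range(COLS):
--             if a[i][j] == "X":
--                 dp[i + 1][j + 1][0] = dp[i][j + 1][0] + 1
--                 dp[i + 1][j + 1][1] = dp[i + 1][j][1] + 1
--     maxi = 0
--     for i in range(ROWS, 0, -1):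
--         for j in range(COLS, 0, -1):
--             curMin = min(dp[i][j][0], dp[i][j][1])
--             while curMin > maxi:
--                 if (
--                     dp[i - curMin + 1][j][1] >= curMin
--                     and dp[i][j - curMin + 1][0] >= curMin
--                 ):
--                     maxi = curMin
--
--                 else:
--                     curMin -= 1
--
--     return maxi
-- ===== SOURCE B (Python) =====
-- def largestSubsquare(n, a):
--     R, C = len(a), len(a[0])
--     # prefix counts of 'X': rowpre[i][j] = #'X' in a[i][0:j], colpre[j][i] = #'X' in col j, rows 0:i
--     rowpre = [[0] * (C + 1) for _ in range(R)]
--     for i in range(R):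
--         for j in range(C):
--             rowpre[i][j + 1] = rowpre[i][j] + (1 if a[i][j] == "X" else 0)
--     colpre = [[0] * (R + 1) for _ in range(C)]
--     for j in range(C):
--         for i in range(R):
--             colpre[j][i + 1] = colpre[j][i] + (1 if a[i][j] == "X" else 0)
--     best = 0
--     for i in range(R):
--         for j in range(C):
--             kmax = min(R - i, C - j)
--             for k in range(best + 1, kmax + 1):
--                 if (rowpre[i][j + k] - rowpre[i][j] == k
--                         and rowpre[i + k - 1][j + k] - rowpre[i + k - 1][j] == k
--                         and colpre[j][i + k] - colpre[j][i] == k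
--                         and colpre[j + k - 1][i + k] - colpre[j + k - 1][i] == k):
--                     best = k
--     return best
-- ===== Notes on version B (the rewrite author's own statement) =====
-- stated objective: alternative
-- what changed: replaces the up/left consecutive-run DP with bottom-right corners and a shrinking while-loop by two prefix-count tables (X-counts along rows and columns) and an ascending scan of candidate sizes per top-left corner, accepting a square when all four border segments have full X-count
import Mathlib
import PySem

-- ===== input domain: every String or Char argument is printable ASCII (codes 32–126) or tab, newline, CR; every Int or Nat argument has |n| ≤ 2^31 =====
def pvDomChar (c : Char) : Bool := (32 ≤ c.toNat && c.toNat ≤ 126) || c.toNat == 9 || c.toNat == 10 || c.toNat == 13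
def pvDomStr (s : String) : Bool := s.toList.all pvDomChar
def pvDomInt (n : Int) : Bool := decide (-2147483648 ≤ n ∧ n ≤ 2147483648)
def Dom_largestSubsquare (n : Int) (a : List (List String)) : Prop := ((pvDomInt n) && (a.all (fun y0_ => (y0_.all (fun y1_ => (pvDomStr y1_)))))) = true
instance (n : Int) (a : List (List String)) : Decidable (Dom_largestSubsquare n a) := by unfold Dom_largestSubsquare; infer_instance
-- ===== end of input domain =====

-- B replaces A's up/left run-length DP (bottom-right corners, shrinking while-loop) by two
-- prefix-count tables and an ascending border-sum scan over top-left corners; same values on Pre_;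
-- B is natural on rectangular grids too, but outside Pre_ nothing is claimed.

-- ===== PORT A =====
-- a[i][j]: element access; under Pre_ every access the Python performs is in range, so getD is exact
def pvCell (a : List (List String)) (i j : Int) : String :=
  (PySem.List.pyGet? ((PySem.List.pyGet? a i).getD []) j).getD ""

-- the Python 'while curMin > maxi' loop of A, verbatim
def pvAWhile (dp : Int × Int → Int × Int) (i j curMin maxi : Int) : Int :=
  if curMin > maxi then
    if (dp (i - curMin + 1, j)).2 ≥ curMin ∧ (dp (i, j - curMin + 1)).1 ≥ curMin then
      curMin
    else
      pvAWhile dp i j (curMin - 1) maxi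
  else maxi
termination_by (curMin - maxi).toNat
decreasing_by omega

-- dp is Python's nested zero-initialised list, modelled as a total function table (exact under Pre_:
-- every read/write the Python performs is in range there)
def largestSubsquare (n : Int) (a : List (List String)) : Int :=
  let ROWS : Int := a.length
  let COLS : Int := ((PySem.List.pyGet? a 0).getD []).length
  let dp0 : Int × Int → Int × Int := fun _ => (0, 0)
  let dp := (PySem.List.pyRange 0 ROWS 1).foldl (fun dp i =>
    (PySem.List.pyRange 0 COLS 1).foldl (fun dp j =>
      if pvCell a i j = "X" then
        fun p => if p = (i + 1, j + 1) then ((dp (i, j + 1)).1 + 1, (dp (i + 1, j)).2 + 1) else dp p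
      else dp) dp) dp0
  let maxi : Int := 0
  (PySem.List.pyRange ROWS 0 (-1)).foldl (fun maxi i =>
    (PySem.List.pyRange COLS 0 (-1)).foldl (fun maxi j =>
      pvAWhile dp i j (min (dp (i, j)).1 (dp (i, j)).2) maxi) maxi) maxi

-- ===== PORT B =====
-- rowpre/colpre are Python's zero-initialised prefix-count lists, modelled as total function tables
def largestSubsquare_alt (n : Int) (a : List (List String)) : Int :=
  let R : Int := a.length
  let C : Int := ((PySem.List.pyGet? a 0).getD []).length
  let rp0 : Int × Int → Int := fun _ => 0
  let rowpre := (PySem.List.pyRange 0 R 1).foldl (fun rp i =>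
    (PySem.List.pyRange 0 C 1).foldl (fun rp j =>
      fun p => if p = (i, j + 1) then rp (i, j) + (if pvCell a i j = "X" then 1 else 0) else rp p) rp) rp0
  let colpre := (PySem.List.pyRange 0 C 1).foldl (fun cp j =>
    (PySem.List.pyRange 0 R 1).foldl (fun cp i =>
      fun p => if p = (j, i + 1) then cp (j, i) + (if pvCell a i j = "X" then 1 else 0) else cp p) cp) rp0
  let best : Int := 0
  (PySem.List.pyRange 0 R 1).foldl (fun best i =>
    (PySem.List.pyRange 0 C 1).foldl (fun best j =>
      let kmax := min (R - i) (C - j)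
      (PySem.List.pyRange (best + 1) (kmax + 1) 1).foldl (fun best k =>
        if rowpre (i, j + k) - rowpre (i, j) = k ∧
           rowpre (i + k - 1, j + k) - rowpre (i + k - 1, j) = k ∧
           colpre (j, i + k) - colpre (j, i) = k ∧
           colpre (j + k - 1, i + k) - colpre (j + k - 1, i) = k
        then k else best) best) best) best

-- ===== PRECONDITION & SPEC =====
-- Pre_ is exactly the inputs on which the Python A returns (everywhere else A raises IndexError):
-- the grid is non-empty, and either its first row is empty (A's loops never run and it returns 0)
-- or the grid is square with every row at least that wide -- A's dp table is built with transposed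
-- dimensions COLS+1 x ROWS+1, so on any non-square grid with a nonempty first row, and on any grid
-- with a row shorter than the first, an index is out of range and A raises.
def Pre_largestSubsquare (n : Int) (a : List (List String)) : Prop :=
  a ≠ [] ∧ ((a.head?.getD []).length = 0 ∨
    ((a.head?.getD []).length = a.length ∧ ∀ r ∈ a, a.length ≤ r.length))

instance (n : Int) (a : List (List String)) : Decidable (Pre_largestSubsquare n a) := by
  unfold Pre_largestSubsquare; infer_instance

def pvWitness_largestSubsquare : Int × List (List String) :=
  (2, [["X", "X"], ["X", "X"]])

def Spec_largestSubsquare (n : Int) (a : List (List String)) (out : Int) : Prop := out = largestSubsquare_alt n a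
instance (n : Int) (a : List (List String)) (out : Int) : Decidable (Spec_largestSubsquare n a out) := by unfold Spec_largestSubsquare; infer_instance

-- ===== CLAIM (what is proved, stated in full; the proofs are below) =====
def Claim_equal_largestSubsquare : Prop := ∀ (n : Int) (a : List (List String)), Dom_largestSubsquare n a → Pre_largestSubsquare n a → Spec_largestSubsquare n a (largestSubsquare n a)



-- ===== LEMMAS AND PROOFS =====

-- a fold whose body ignores its element is the identity
lemma pvFoldlConst {α β : Type} (l : List β) (x : α) : List.foldl (fun acc _ => acc) x l = x := by
  induction l <;> simp [*]

-- run length of consecutive 'true' ending at index n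
def pvRun (f : Nat → Bool) : Nat → Int
  | 0 => if f 0 then 1 else 0
  | n + 1 => if f (n + 1) then pvRun f n + 1 else 0

-- number of 'true' among indices < n
def pvCnt (f : Nat → Bool) : Nat → Int
  | 0 => 0
  | n + 1 => pvCnt f n + (if f n then 1 else 0)

def pvUpI (X : Int → Int → Prop) [∀ i j, Decidable (X i j)] (i j : Int) : Int :=
  pvRun (fun t => decide (X (↑t) j)) i.toNat
def pvLeftI (X : Int → Int → Prop) [∀ i j, Decidable (X i j)] (i j : Int) : Int :=
  pvRun (fun t => decide (X i (↑t))) j.toNat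

lemma pvUpI_eq (X : Int → Int → Prop) [∀ i j, Decidable (X i j)] (i j : Int) (hi : 0 ≤ i) :
    pvUpI X i j = if X i j then (if i = 0 then 1 else pvUpI X (i - 1) j + 1) else 0 := by
  obtain ⟨m, rfl⟩ : ∃ m : Nat, i = (m : Int) := ⟨i.toNat, by omega⟩
  cases m with
  | zero => simp [pvUpI, pvRun]
  | succ m =>
    have h1 : ((m + 1 : Nat) : Int).toNat = m + 1 := by omega
    have h2 : (((m + 1 : Nat) : Int) - 1).toNat = m := by omega
    simp only [pvUpI, h1, h2, pvRun, decide_eq_true_eq]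
    have h3 : ((m + 1 : Nat) : Int) ≠ 0 := by omega
    rw [if_neg h3]

lemma pvLeftI_eq (X : Int → Int → Prop) [∀ i j, Decidable (X i j)] (i j : Int) (hj : 0 ≤ j) :
    pvLeftI X i j = if X i j then (if j = 0 then 1 else pvLeftI X i (j - 1) + 1) else 0 := by
  obtain ⟨m, rfl⟩ : ∃ m : Nat, j = (m : Int) := ⟨j.toNat, by omega⟩
  cases m with
  | zero => simp [pvLeftI, pvRun]
  | succ m =>
    have h1 : ((m + 1 : Nat) : Int).toNat = m + 1 := by omega
    have h2 : (((m + 1 : Nat) : Int) - 1).toNat = m := by omega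
    simp only [pvLeftI, h1, h2, pvRun, decide_eq_true_eq]
    have h3 : ((m + 1 : Nat) : Int) ≠ 0 := by omega
    rw [if_neg h3]

-- horizontal / vertical all-X segments and the X-border predicate (top-left (i,j), size k)
def pvHseg (X : Int → Int → Prop) (i j k : Int) : Prop := ∀ t : Int, 0 ≤ t → t < k → X i (j + t)
def pvVseg (X : Int → Int → Prop) (i j k : Int) : Prop := ∀ t : Int, 0 ≤ t → t < k → X (i + t) j
def pvBdr (X : Int → Int → Prop) (i j k : Int) : Prop :=
  pvHseg X i j k ∧ pvHseg X (i + k - 1) j k ∧ pvVseg X i j k ∧ pvVseg X i (j + k - 1) k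
def pvGood (X : Int → Int → Prop) (N k : Int) : Prop :=
  1 ≤ k ∧ ∃ i j, 0 ≤ i ∧ 0 ≤ j ∧ i + k ≤ N ∧ j + k ≤ N ∧ pvBdr X i j k

lemma pvRun_nonneg (f : Nat → Bool) (n : Nat) : 0 ≤ pvRun f n := by
  induction n with
  | zero => simp only [pvRun]; split <;> omega
  | succ m ih => simp only [pvRun]; split <;> omega

-- ascending characterisation of the run length
lemma pvRun_ge_iff (f : Nat → Bool) (n k : Nat) :
    ((k : Int) ≤ pvRun f n) ↔ (k ≤ n + 1 ∧ ∀ t < k, f (n + 1 - k + t) = true) := by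
  induction n generalizing k with
  | zero =>
    cases k with
    | zero => simpa using pvRun_nonneg f 0
    | succ k' =>
      simp only [pvRun]
      constructor
      · intro h
        split at h
        · next hf =>
          have hk : k' = 0 := by omega
          subst hk
          exact ⟨by omega, by intro t ht; interval_cases t; simpa using hf⟩
        · omega
      · rintro ⟨h1, h2⟩
        have hk : k' = 0 := by omega
        subst hk
        have := h2 0 (by omega)
        simp at this
        simp [this]
  | succ m ih =>
    cases k with
    | zero => simpa using pvRun_nonneg f (m + 1)
    | succ k' =>
      simp only [pvRun]
      constructor
      · intro h
        split at h
        · next hf =>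
          have h' := (ih k').1 (by push_cast at h ⊢; omega)
          refine ⟨by omega, ?_⟩
          intro t ht
          rcases Nat.lt_or_ge t k' with ht' | ht'
          · have := h'.2 t ht'
            have harr : m + 1 + 1 - (k' + 1) + t = m + 1 - k' + t := by omega
            rw [harr]; exact this
          · have ht0 : t = k' := by omega
            have harr : m + 1 + 1 - (k' + 1) + t = m + 1 := by omega
            rw [harr]; exact hf
        · omega
      · rintro ⟨h1, h2⟩
        have hf : f (m + 1) = true := by
          have := h2 k' (by omega)
          have harr : m + 1 + 1 - (k' + 1) + k' = m + 1 := by omega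
          rwa [harr] at this
        rw [if_pos hf]
        have : (k' : Int) ≤ pvRun f m := by
          apply (ih k').2
          refine ⟨by omega, ?_⟩
          intro t ht
          have := h2 t (by omega)
          have harr : m + 1 + 1 - (k' + 1) + t = m + 1 - k' + t := by omega
          rwa [harr] at this
        omega

lemma pvCnt_sub_bounds (f : Nat → Bool) (a d : Nat) :
    0 ≤ pvCnt f (a + d) - pvCnt f a ∧ pvCnt f (a + d) - pvCnt f a ≤ (d : Int) := by
  induction d with
  | zero => simp
  | succ e ih =>
    have harr : a + (e + 1) = (a + e) + 1 := by omega
    rw [harr]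
    simp only [pvCnt]
    split <;> push_cast <;> omega

lemma pvCnt_seg_iff (f : Nat → Bool) (a d : Nat) :
    (pvCnt f (a + d) - pvCnt f a = (d : Int)) ↔ (∀ t < d, f (a + t) = true) := by
  induction d with
  | zero => simp
  | succ e ih =>
    have hb := pvCnt_sub_bounds f a e
    have harr : a + (e + 1) = (a + e) + 1 := by omega
    rw [harr]
    simp only [pvCnt]
    constructor
    · intro h
      have hf : f (a + e) = true := by
        by_contra hf
        simp [hf] at h
        push_cast at h
        omega
      rw [hf] at h
      have he : pvCnt f (a + e) - pvCnt f a = (e : Int) := by omega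
      intro t ht
      rcases Nat.lt_or_ge t e with ht' | ht'
      · exact ih.1 he t ht'
      · have : t = e := by omega
        subst this; exact hf
    · intro h
      have hf : f (a + e) = true := h e (by omega)
      rw [hf]
      have he : pvCnt f (a + e) - pvCnt f a = (e : Int) := ih.2 (fun t ht => h t (by omega))
      simp only [if_true]
      push_cast
      omega

-- sum of w over indices < n
def pvPsum (w : Int → Int) : Nat → Int
  | 0 => 0
  | n + 1 => pvPsum w n + w (↑n)

-- one row of the prefix-table fill
lemma pvFillInner (T : Nat) (o : Int) (wo : Int → Int) (f0 : Int × Int → Int) (h0 : f0 (o, 0) = 0)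
    (p : Int × Int) :
    ((PySem.List.pyRange 0 (↑T) 1).foldl
      (fun f t => fun q => if q = (o, t + 1) then f (o, t) + wo t else f q) f0) p
    = if p.1 = o ∧ 1 ≤ p.2 ∧ p.2 ≤ (T : Int) then pvPsum wo p.2.toNat else f0 p := by
  induction T generalizing p with
  | zero =>
    rw [PySem.List.pyRange_one_eq_nil (by simp)]
    simp only [List.foldl_nil]
    rw [if_neg (by omega)]
  | succ T ih =>
    have hcast : ((T + 1 : Nat) : Int) = (T : Int) + 1 := by push_cast; ring
    rw [hcast, PySem.List.pyRange_one_succ_right (by positivity), List.foldl_append]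
    simp only [List.foldl_cons, List.foldl_nil]
    by_cases hp : p = (o, (T : Int) + 1)
    · subst hp
      rw [if_pos rfl, if_pos ⟨rfl, by omega, by omega⟩, ih]
      have ht : ((T : Int) + 1).toNat = T + 1 := by omega
      rw [ht]
      cases T with
      | zero => simp [pvPsum, h0]
      | succ S =>
        rw [if_pos ⟨rfl, by push_cast; omega, le_refl _⟩]
        have h2 : ((S + 1 : Nat) : Int).toNat = S + 1 := by omega
        rw [h2]
        rfl
    · rw [if_neg hp, ih]
      rcases p with ⟨p1, p2⟩
      by_cases hc : p1 = o ∧ 1 ≤ p2 ∧ p2 ≤ (T : Int)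
      · rw [if_pos hc, if_pos ⟨hc.1, hc.2.1, by have := hc.2.2; omega⟩]
      · rw [if_neg hc, if_neg ?_]
        intro hcc
        have hne : ¬(p1 = o ∧ p2 = (T : Int) + 1) := by
          intro hh; exact hp (by rw [hh.1, hh.2])
        exact hc ⟨hcc.1, hcc.2.1, by omega⟩

-- the whole prefix-table fill
lemma pvFill (O T : Nat) (w : Int → Int → Int) (p : Int × Int) :
    ((PySem.List.pyRange 0 (↑O) 1).foldl (fun f o =>
      (PySem.List.pyRange 0 (↑T) 1).foldl
        (fun f t => fun q => if q = (o, t + 1) then f (o, t) + w o t else f q) f) (fun _ => (0 : Int))) p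
    = if 0 ≤ p.1 ∧ p.1 < (O : Int) ∧ 1 ≤ p.2 ∧ p.2 ≤ (T : Int) then pvPsum (w p.1) p.2.toNat else 0 := by
  induction O generalizing p with
  | zero =>
    have h0 : PySem.List.pyRange 0 ((0 : Nat) : Int) 1 = [] := PySem.List.pyRange_one_eq_nil (by simp)
    rw [h0]
    simp only [List.foldl_nil]
    rw [if_neg (by omega)]
  | succ O ih =>
    have hcast : ((O + 1 : Nat) : Int) = (O : Int) + 1 := by push_cast; ring
    rw [hcast, PySem.List.pyRange_one_succ_right (by positivity), List.foldl_append]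
    simp only [List.foldl_cons, List.foldl_nil]
    rw [pvFillInner T (↑O) (w ↑O) _ (by rw [ih]; rw [if_neg (by omega)]) p, ih p]
    by_cases hp1 : p.1 = (O : Int) ∧ 1 ≤ p.2 ∧ p.2 ≤ (T : Int)
    · rw [if_pos hp1, if_pos ⟨by omega, by omega, hp1.2.1, hp1.2.2⟩, hp1.1]
    · rw [if_neg hp1]
      by_cases hp2 : 0 ≤ p.1 ∧ p.1 < (O : Int) ∧ 1 ≤ p.2 ∧ p.2 ≤ (T : Int)
      · rw [if_pos hp2, if_pos ⟨hp2.1, by omega, hp2.2.2.1, hp2.2.2.2⟩]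
      · rw [if_neg hp2, if_neg ?_]
        intro h
        by_cases he : p.1 = (O : Int)
        · exact hp1 ⟨he, h.2.2.1, h.2.2.2⟩
        · exact hp2 ⟨h.1, by omega, h.2.2.1, h.2.2.2⟩

-- one row of A's dp fill
lemma pvFillDpInner (N : Nat) (X : Int → Int → Prop) [∀ i j, Decidable (X i j)] (i : Int) (hi : 0 ≤ i) (f0 : Int × Int → Int × Int)
    (hrow : ∀ j : Int, 0 ≤ j → j < (N : Int) →
      f0 (i, j + 1) = if i = 0 then (0, 0) else (pvUpI X (i - 1) j, pvLeftI X (i - 1) j))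
    (hz : ∀ j : Int, f0 (i + 1, j) = (0, 0))
    (p : Int × Int) :
    ((PySem.List.pyRange 0 (↑N) 1).foldl (fun dp j =>
      if X i j then
        (fun q => if q = (i + 1, j + 1) then ((dp (i, j + 1)).1 + 1, (dp (i + 1, j)).2 + 1) else dp q)
      else dp) f0) p
    = if p.1 = i + 1 ∧ 1 ≤ p.2 ∧ p.2 ≤ (N : Int) then (pvUpI X i (p.2 - 1), pvLeftI X i (p.2 - 1)) else f0 p := by
  induction N generalizing p with
  | zero =>
    have h0 : PySem.List.pyRange 0 ((0 : Nat) : Int) 1 = [] := PySem.List.pyRange_one_eq_nil (by simp)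
    rw [h0]
    simp only [List.foldl_nil]
    rw [if_neg (by omega)]
  | succ T ihT =>
    have hrow' : ∀ j : Int, 0 ≤ j → j < (T : Int) →
        f0 (i, j + 1) = if i = 0 then (0, 0) else (pvUpI X (i - 1) j, pvLeftI X (i - 1) j) := by
      intro j h1 h2; exact hrow j h1 (by push_cast; omega)
    have ih := fun p => ihT hrow' p
    have hcast : ((T + 1 : Nat) : Int) = (T : Int) + 1 := by push_cast; ring
    rw [hcast, PySem.List.pyRange_one_succ_right (by positivity), List.foldl_append]
    simp only [List.foldl_cons, List.foldl_nil]
    have hup : (((PySem.List.pyRange 0 (↑T) 1).foldl (fun dp j =>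
        if X i j then
          (fun q => if q = (i + 1, j + 1) then ((dp (i, j + 1)).1 + 1, (dp (i + 1, j)).2 + 1) else dp q)
        else dp) f0) (i, (T : Int) + 1)) = f0 (i, (T : Int) + 1) := by
      rw [ih]; rw [if_neg (by omega)]
    have hleft : (((PySem.List.pyRange 0 (↑T) 1).foldl (fun dp j =>
        if X i j then
          (fun q => if q = (i + 1, j + 1) then ((dp (i, j + 1)).1 + 1, (dp (i + 1, j)).2 + 1) else dp q)
        else dp) f0) (i + 1, (T : Int)))
        = if 1 ≤ (T : Int) then (pvUpI X i ((T : Int) - 1), pvLeftI X i ((T : Int) - 1)) else (0, 0) := by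
      rw [ih]
      by_cases hT : 1 ≤ (T : Int)
      · rw [if_pos ⟨rfl, hT, le_refl _⟩, if_pos hT]
      · rw [if_neg (by omega), if_neg hT, hz]
    have hnewval : ¬ X i (T : Int) → (pvUpI X i (T : Int), pvLeftI X i (T : Int)) = ((0 : Int), (0 : Int)) := by
      intro hX
      rw [pvUpI_eq X i (T : Int) hi, pvLeftI_eq X i (T : Int) (by positivity), if_neg hX, if_neg hX]
    by_cases hX : X i (T : Int)
    · rw [if_pos hX]
      by_cases hp : p = (i + 1, (T : Int) + 1)
      · subst hp
        rw [if_pos (rfl : ((i + 1 : Int), (T : Int) + 1) = (i + 1, (T : Int) + 1))]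
        rw [if_pos ⟨rfl, by omega, by omega⟩, hup, hleft]
        have e1 : (T : Int) + 1 - 1 = (T : Int) := by ring
        rw [e1, pvUpI_eq X i (T : Int) hi, pvLeftI_eq X i (T : Int) (by positivity), if_pos hX, if_pos hX]
        rw [hrow (T : Int) (by positivity) (by push_cast; omega)]
        by_cases hi0 : i = 0
        · rw [if_pos hi0, if_pos hi0]
          by_cases hT : 1 ≤ (T : Int)
          · rw [if_pos hT]
            by_cases hT0 : (T : Int) = 0
            · omega
            · rw [if_neg hT0]
              simp
          · rw [if_neg hT]
            have hT0 : (T : Int) = 0 := by omega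
            rw [if_pos hT0]
            simp
        · rw [if_neg hi0, if_neg hi0]
          by_cases hT : 1 ≤ (T : Int)
          · rw [if_pos hT]
            have hT0 : ¬ (T : Int) = 0 := by omega
            rw [if_neg hT0]
          · rw [if_neg hT]
            have hT0 : (T : Int) = 0 := by omega
            rw [if_pos hT0]
            simp
      · rw [if_neg hp, ih p]
        rcases p with ⟨p1, p2⟩
        by_cases hc : p1 = i + 1 ∧ 1 ≤ p2 ∧ p2 ≤ (T : Int)
        · rw [if_pos hc, if_pos ⟨hc.1, hc.2.1, by have := hc.2.2; omega⟩]
        · rw [if_neg hc, if_neg ?_]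
          intro hcc
          have hne : ¬(p1 = i + 1 ∧ p2 = (T : Int) + 1) := by
            intro hh; exact hp (by rw [hh.1, hh.2])
          by_cases h2 : p2 = (T : Int) + 1
          · exact hne ⟨hcc.1, h2⟩
          · exact hc ⟨hcc.1, hcc.2.1, by have := hcc.2.2; omega⟩
    · rw [if_neg hX, ih p]
      rcases p with ⟨p1, p2⟩
      by_cases hc : p1 = i + 1 ∧ 1 ≤ p2 ∧ p2 ≤ (T : Int)
      · rw [if_pos hc, if_pos ⟨hc.1, hc.2.1, by have := hc.2.2; omega⟩]
      · rw [if_neg hc]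
        by_cases hcc : p1 = i + 1 ∧ 1 ≤ p2 ∧ p2 ≤ (T : Int) + 1
        · have h2 : p2 = (T : Int) + 1 := by
            rcases hcc with ⟨e1, e2, e3⟩
            by_contra h2
            exact hc ⟨e1, e2, by omega⟩
          rw [if_pos hcc]
          have e4 : p2 - 1 = (T : Int) := by omega
          rw [e4, hnewval hX, hcc.1, h2, hz ((T : Int) + 1)]
        · rw [if_neg hcc]

-- the whole dp fill of A
lemma pvFillDp (N : Nat) (X : Int → Int → Prop) [∀ i j, Decidable (X i j)] (p : Int × Int) :
    ((PySem.List.pyRange 0 (↑N) 1).foldl (fun dp i =>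
      (PySem.List.pyRange 0 (↑N) 1).foldl (fun dp j =>
        if X i j then
          (fun q => if q = (i + 1, j + 1) then ((dp (i, j + 1)).1 + 1, (dp (i + 1, j)).2 + 1) else dp q)
        else dp) dp) (fun _ => ((0 : Int), (0 : Int)))) p
    = if 1 ≤ p.1 ∧ p.1 ≤ (N : Int) ∧ 1 ≤ p.2 ∧ p.2 ≤ (N : Int)
      then (pvUpI X (p.1 - 1) (p.2 - 1), pvLeftI X (p.1 - 1) (p.2 - 1)) else (0, 0) := by
  suffices H : ∀ (R : Nat) (p : Int × Int),
      ((PySem.List.pyRange 0 (↑R) 1).foldl (fun dp i =>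
        (PySem.List.pyRange 0 (↑N) 1).foldl (fun dp j =>
          if X i j then
            (fun q => if q = (i + 1, j + 1) then ((dp (i, j + 1)).1 + 1, (dp (i + 1, j)).2 + 1) else dp q)
          else dp) dp) (fun _ => ((0 : Int), (0 : Int)))) p
      = if 1 ≤ p.1 ∧ p.1 ≤ (R : Int) ∧ 1 ≤ p.2 ∧ p.2 ≤ (N : Int)
        then (pvUpI X (p.1 - 1) (p.2 - 1), pvLeftI X (p.1 - 1) (p.2 - 1)) else (0, 0) by
    exact H N p
  intro R
  induction R with
  | zero =>
    intro p
    have h0 : PySem.List.pyRange 0 ((0 : Nat) : Int) 1 = [] := PySem.List.pyRange_one_eq_nil (by simp)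
    rw [h0]
    simp only [List.foldl_nil]
    rw [if_neg (by omega)]
  | succ R ih =>
    intro p
    have hcast : ((R + 1 : Nat) : Int) = (R : Int) + 1 := by push_cast; ring
    have hsplit : PySem.List.pyRange 0 ((R + 1 : Nat) : Int) 1
        = PySem.List.pyRange 0 ((R : Nat) : Int) 1 ++ [((R : Nat) : Int)] := by
      rw [hcast]; exact PySem.List.pyRange_one_succ_right (by positivity)
    rw [hsplit, List.foldl_append]
    simp only [List.foldl_cons, List.foldl_nil]
    rw [pvFillDpInner N X (↑R) (by positivity) _ ?_ ?_ p]
    · rw [ih p]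
      rcases p with ⟨p1, p2⟩
      by_cases hc : p1 = (R : Int) + 1 ∧ 1 ≤ p2 ∧ p2 ≤ (N : Int)
      · rw [if_pos hc, if_pos ⟨by omega, by omega, hc.2.1, hc.2.2⟩]
        rw [hc.1]
        norm_num
      · rw [if_neg hc]
        by_cases hc2 : 1 ≤ p1 ∧ p1 ≤ (R : Int) ∧ 1 ≤ p2 ∧ p2 ≤ (N : Int)
        · rw [if_pos hc2, if_pos ⟨hc2.1, by omega, hc2.2.2.1, hc2.2.2.2⟩]
        · rw [if_neg hc2, if_neg ?_]
          intro h
          by_cases he : p1 = (R : Int) + 1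
          · exact hc ⟨he, h.2.2.1, h.2.2.2⟩
          · exact hc2 ⟨h.1, by omega, h.2.2.1, h.2.2.2⟩
    · intro j h1 h2
      rw [ih (↑R, j + 1)]
      by_cases hR : (R : Int) = 0
      · rw [if_neg (by omega), if_pos hR]
      · rw [if_pos ⟨by omega, le_refl _, by omega, by omega⟩, if_neg hR]
        have e1 : ((R : Int), j + 1).2 - 1 = j := by ring
        have e2 : ((R : Int), j + 1).1 - 1 = (R : Int) - 1 := by ring
        rw [e1, e2]
    · intro j
      rw [ih ((↑R : Int) + 1, j)]
      rw [if_neg (by omega)]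

-- characterisation of A's while loop
lemma pvAWhile_char (dp : Int × Int → Int × Int) (i j curMin maxi : Int) :
    maxi ≤ pvAWhile dp i j curMin maxi ∧
    (pvAWhile dp i j curMin maxi = maxi ∨
      (maxi < pvAWhile dp i j curMin maxi ∧ pvAWhile dp i j curMin maxi ≤ curMin ∧
        (dp (i - pvAWhile dp i j curMin maxi + 1, j)).2 ≥ pvAWhile dp i j curMin maxi ∧
        (dp (i, j - pvAWhile dp i j curMin maxi + 1)).1 ≥ pvAWhile dp i j curMin maxi)) ∧
    (∀ c : Int, maxi < c → c ≤ curMin →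
      (dp (i - c + 1, j)).2 ≥ c → (dp (i, j - c + 1)).1 ≥ c → c ≤ pvAWhile dp i j curMin maxi) := by
  suffices H : ∀ (F : Nat) (curMin : Int), (curMin - maxi).toNat ≤ F →
      maxi ≤ pvAWhile dp i j curMin maxi ∧
      (pvAWhile dp i j curMin maxi = maxi ∨
        (maxi < pvAWhile dp i j curMin maxi ∧ pvAWhile dp i j curMin maxi ≤ curMin ∧
          (dp (i - pvAWhile dp i j curMin maxi + 1, j)).2 ≥ pvAWhile dp i j curMin maxi ∧
          (dp (i, j - pvAWhile dp i j curMin maxi + 1)).1 ≥ pvAWhile dp i j curMin maxi)) ∧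
      (∀ c : Int, maxi < c → c ≤ curMin →
        (dp (i - c + 1, j)).2 ≥ c → (dp (i, j - c + 1)).1 ≥ c → c ≤ pvAWhile dp i j curMin maxi) by
    exact H (curMin - maxi).toNat curMin (le_refl _)
  intro F
  induction F with
  | zero =>
    intro curMin hF
    have hle : curMin ≤ maxi := by omega
    rw [pvAWhile, if_neg (by omega)]
    exact ⟨le_refl _, Or.inl rfl, fun c h1 h2 _ _ => by omega⟩
  | succ F ihF =>
    intro curMin hF
    by_cases hgt : curMin > maxi
    · rw [pvAWhile, if_pos hgt]
      by_cases hcond : (dp (i - curMin + 1, j)).2 ≥ curMin ∧ (dp (i, j - curMin + 1)).1 ≥ curMin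
      · rw [if_pos hcond]
        exact ⟨by omega, Or.inr ⟨hgt, le_refl _, hcond.1, hcond.2⟩, fun c h1 h2 _ _ => h2⟩
      · rw [if_neg hcond]
        obtain ⟨c1, c2, c3⟩ := ihF (curMin - 1) (by omega)
        refine ⟨c1, ?_, ?_⟩
        · rcases c2 with h | h
          · exact Or.inl h
          · exact Or.inr ⟨h.1, by omega, h.2.2.1, h.2.2.2⟩
        · intro c h1 h2 h3 h4
          by_cases hc : c ≤ curMin - 1
          · exact c3 c h1 hc h3 h4
          · exfalso
            have : c = curMin := by omega
            subst this
            exact hcond ⟨h3, h4⟩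
    · rw [pvAWhile, if_neg hgt]
      exact ⟨le_refl _, Or.inl rfl, fun c h1 h2 _ _ => by omega⟩

-- characterisation of B's ascending inner scan
lemma pvBScan_char (Q : Int → Prop) [DecidablePred Q] (lo hi acc : Int) (hacc : acc < lo) :
    acc ≤ ((PySem.List.pyRange lo hi 1).foldl (fun b k => if Q k then k else b) acc) ∧
    (((PySem.List.pyRange lo hi 1).foldl (fun b k => if Q k then k else b) acc) = acc ∨
      (lo ≤ ((PySem.List.pyRange lo hi 1).foldl (fun b k => if Q k then k else b) acc) ∧
       ((PySem.List.pyRange lo hi 1).foldl (fun b k => if Q k then k else b) acc) < hi ∧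
       Q (((PySem.List.pyRange lo hi 1).foldl (fun b k => if Q k then k else b) acc)))) ∧
    (∀ k : Int, lo ≤ k → k < hi → Q k →
      k ≤ ((PySem.List.pyRange lo hi 1).foldl (fun b k => if Q k then k else b) acc)) := by
  suffices H : ∀ (F : Nat) (lo acc : Int), (hi - lo).toNat ≤ F → acc < lo →
      acc ≤ ((PySem.List.pyRange lo hi 1).foldl (fun b k => if Q k then k else b) acc) ∧
      (((PySem.List.pyRange lo hi 1).foldl (fun b k => if Q k then k else b) acc) = acc ∨
        (lo ≤ ((PySem.List.pyRange lo hi 1).foldl (fun b k => if Q k then k else b) acc) ∧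
         ((PySem.List.pyRange lo hi 1).foldl (fun b k => if Q k then k else b) acc) < hi ∧
         Q (((PySem.List.pyRange lo hi 1).foldl (fun b k => if Q k then k else b) acc)))) ∧
      (∀ k : Int, lo ≤ k → k < hi → Q k →
        k ≤ ((PySem.List.pyRange lo hi 1).foldl (fun b k => if Q k then k else b) acc)) by
    exact H (hi - lo).toNat lo acc (le_refl _) hacc
  intro F
  induction F with
  | zero =>
    intro lo acc hF hacc
    rw [PySem.List.pyRange_one_eq_nil (by omega)]
    simp only [List.foldl_nil]
    exact ⟨le_refl _, Or.inl (by trivial), fun k h1 h2 _ => by omega⟩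
  | succ F ihF =>
    intro lo acc hF hacc
    by_cases hlt : lo < hi
    · rw [PySem.List.pyRange_one_cons hlt]
      simp only [List.foldl_cons]
      by_cases hQ : Q lo
      · rw [if_pos hQ]
        obtain ⟨c1, c2, c3⟩ := ihF (lo + 1) lo (by omega) (by omega)
        refine ⟨by omega, ?_, ?_⟩
        · rcases c2 with h | h
          · exact Or.inr ⟨by omega, by omega, by rw [h]; exact hQ⟩
          · exact Or.inr ⟨by omega, h.2.1, h.2.2⟩
        · intro k h1 h2 hk
          by_cases hk1 : lo + 1 ≤ k
          · exact c3 k hk1 h2 hk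
          · have : k = lo := by omega
            subst this
            exact c1
      · rw [if_neg hQ]
        obtain ⟨c1, c2, c3⟩ := ihF (lo + 1) acc (by omega) (by omega)
        refine ⟨c1, ?_, ?_⟩
        · rcases c2 with h | h
          · exact Or.inl h
          · exact Or.inr ⟨by omega, h.2.1, h.2.2⟩
        · intro k h1 h2 hk
          by_cases hk1 : lo + 1 ≤ k
          · exact c3 k hk1 h2 hk
          · have : k = lo := by omega
            subst this
            exact absurd hk hQ
    · rw [PySem.List.pyRange_one_eq_nil (by omega)]
      simp only [List.foldl_nil]
      exact ⟨le_refl _, Or.inl (by trivial), fun k h1 h2 _ => by omega⟩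

-- nested fold = fold over the cell list
lemma pvFoldFlat {α β γ : Type} (l : List β) (h : β → List γ) (g : α → β → γ → α) (init : α) :
    l.foldl (fun acc i => (h i).foldl (fun acc j => g acc i j) acc) init
    = (l.flatMap (fun i => (h i).map (fun j => (i, j)))).foldl (fun acc p => g acc p.1 p.2) init := by
  induction l generalizing init with
  | nil => rfl
  | cons x xs ih =>
    simp only [List.foldl_cons, List.flatMap_cons, List.foldl_append, List.foldl_map]
    exact ih _

lemma pvFoldMono {α : Type} (l : List α) (g : Int → α → Int) (init : Int)
    (h : ∀ acc x, x ∈ l → acc ≤ g acc x) : init ≤ l.foldl g init := by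
  induction l generalizing init with
  | nil => simp
  | cons x xs ih =>
    simp only [List.foldl_cons]
    exact le_trans (h init x (by simp)) (ih _ (fun acc y hy => h acc y (by simp [hy])))

lemma pvFoldGe {α : Type} (l : List α) (g : Int → α → Int) (init : Int) (x : α) (k : Int)
    (hx : x ∈ l) (hstep : ∀ acc, k ≤ g acc x) (hmono : ∀ acc y, y ∈ l → acc ≤ g acc y) :
    k ≤ l.foldl g init := by
  induction l generalizing init with
  | nil => cases hx
  | cons y ys ih =>
    simp only [List.foldl_cons]
    rcases List.mem_cons.1 hx with rfl | hx'
    · exact le_trans (hstep init) (pvFoldMono ys g _ (fun acc z hz => hmono acc z (by simp [hz])))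
    · exact ih _ hx' (fun acc z hz => hmono acc z (by simp [hz]))

lemma pvFoldInv {α : Type} (l : List α) (g : Int → α → Int) (init : Int) (P : Int → Prop)
    (hinit : P init) (hstep : ∀ acc x, x ∈ l → P acc → P (g acc x)) : P (l.foldl g init) := by
  induction l generalizing init with
  | nil => exact hinit
  | cons x xs ih =>
    simp only [List.foldl_cons]
    exact ih _ (hstep init x (by simp) hinit) (fun acc y hy hp => hstep acc y (by simp [hy]) hp)

-- the two results agree once both are characterised against pvGood
lemma pvUnique (X : Int → Int → Prop) (N : Int) (r1 r2 : Int)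
    (h1 : 0 ≤ r1 ∧ (r1 = 0 ∨ pvGood X N r1) ∧ ∀ k, pvGood X N k → k ≤ r1)
    (h2 : 0 ≤ r2 ∧ (r2 = 0 ∨ pvGood X N r2) ∧ ∀ k, pvGood X N k → k ≤ r2) :
    r1 = r2 := by
  obtain ⟨hn1, hs1, hc1⟩ := h1
  obtain ⟨hn2, hs2, hc2⟩ := h2
  rcases hs1 with h10 | hg1
  · rcases hs2 with h20 | hg2
    · omega
    · have := hc1 _ hg2; have := hg2.1; omega
  · have := hc2 _ hg1
    rcases hs2 with h20 | hg2
    · have := hg1.1; omega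
    · have := hc1 _ hg2; omega

lemma pvUpI_ge (X : Int → Int → Prop) [∀ i j, Decidable (X i j)] (i j k : Int)
    (hi : 0 ≤ i) (hk : 0 ≤ k) :
    (k ≤ pvUpI X i j) ↔ (k ≤ i + 1 ∧ pvVseg X (i + 1 - k) j k) := by
  obtain ⟨m, rfl⟩ : ∃ m : Nat, i = (m : Int) := ⟨i.toNat, by omega⟩
  obtain ⟨c, rfl⟩ : ∃ c : Nat, k = (c : Int) := ⟨k.toNat, by omega⟩
  unfold pvUpI
  have h1 : ((m : Int)).toNat = m := by omega
  rw [h1, pvRun_ge_iff]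
  unfold pvVseg
  constructor
  · rintro ⟨hc, hall⟩
    refine ⟨by push_cast; omega, ?_⟩
    intro t ht0 htk
    obtain ⟨tn, rfl⟩ : ∃ tn : Nat, t = (tn : Int) := ⟨t.toNat, by omega⟩
    have h2 := hall tn (by exact_mod_cast htk)
    have harr : ((m : Int) + 1 - (c : Int) + (tn : Int)) = ((m + 1 - c + tn : Nat) : Int) := by
      push_cast [Nat.cast_sub (by omega : c ≤ m + 1)]; ring
    rw [harr]
    exact of_decide_eq_true h2
  · rintro ⟨hc, hseg⟩
    refine ⟨by exact_mod_cast hc, ?_⟩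
    intro t ht
    apply decide_eq_true
    have h2 := hseg (t : Int) (by positivity) (by exact_mod_cast ht)
    have harr : ((m : Int) + 1 - (c : Int) + (t : Int)) = ((m + 1 - c + t : Nat) : Int) := by
      push_cast [Nat.cast_sub (by exact_mod_cast hc : c ≤ m + 1)]; ring
    rwa [harr] at h2

lemma pvLeftI_ge (X : Int → Int → Prop) [∀ i j, Decidable (X i j)] (i j k : Int)
    (hj : 0 ≤ j) (hk : 0 ≤ k) :
    (k ≤ pvLeftI X i j) ↔ (k ≤ j + 1 ∧ pvHseg X i (j + 1 - k) k) := by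
  obtain ⟨m, rfl⟩ : ∃ m : Nat, j = (m : Int) := ⟨j.toNat, by omega⟩
  obtain ⟨c, rfl⟩ : ∃ c : Nat, k = (c : Int) := ⟨k.toNat, by omega⟩
  unfold pvLeftI
  have h1 : ((m : Int)).toNat = m := by omega
  rw [h1, pvRun_ge_iff]
  unfold pvHseg
  constructor
  · rintro ⟨hc, hall⟩
    refine ⟨by push_cast; omega, ?_⟩
    intro t ht0 htk
    obtain ⟨tn, rfl⟩ : ∃ tn : Nat, t = (tn : Int) := ⟨t.toNat, by omega⟩
    have h2 := hall tn (by exact_mod_cast htk)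
    have harr : ((m : Int) + 1 - (c : Int) + (tn : Int)) = ((m + 1 - c + tn : Nat) : Int) := by
      push_cast [Nat.cast_sub (by omega : c ≤ m + 1)]; ring
    rw [harr]
    exact of_decide_eq_true h2
  · rintro ⟨hc, hseg⟩
    refine ⟨by exact_mod_cast hc, ?_⟩
    intro t ht
    apply decide_eq_true
    have h2 := hseg (t : Int) (by positivity) (by exact_mod_cast ht)
    have harr : ((m : Int) + 1 - (c : Int) + (t : Int)) = ((m + 1 - c + t : Nat) : Int) := by
      push_cast [Nat.cast_sub (by exact_mod_cast hc : c ≤ m + 1)]; ring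
    rwa [harr] at h2

lemma pvPsum_eq_cnt (P : Int → Prop) [DecidablePred P] (m : Nat) :
    pvPsum (fun j => if P j then 1 else 0) m = pvCnt (fun t => decide (P (t : Int))) m := by
  induction m with
  | zero => rfl
  | succ m ih =>
    simp only [pvPsum, pvCnt, ih]
    by_cases h : P (m : Int)
    · rw [if_pos h, if_pos (decide_eq_true h)]
    · rw [if_neg h, if_neg (by simpa using h)]

lemma pvPsum_seg (P : Int → Prop) [DecidablePred P] (A B : Int) (hA : 0 ≤ A) (hAB : A ≤ B) :
    (pvPsum (fun j => if P j then 1 else 0) B.toNat - pvPsum (fun j => if P j then 1 else 0) A.toNat = B - A)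
    ↔ (∀ t : Int, A ≤ t → t < B → P t) := by
  rw [pvPsum_eq_cnt, pvPsum_eq_cnt]
  set d := (B - A).toNat with hdd
  have hd : B.toNat = A.toNat + d := by omega
  have hBA : ((d : Nat) : Int) = B - A := by omega
  rw [hd, ← hBA, pvCnt_seg_iff]
  constructor
  · intro h t h1 h2
    have h3 := h (t - A).toNat (by omega)
    have harr : ((A.toNat + (t - A).toNat : Nat) : Int) = t := by omega
    rw [harr] at h3
    exact of_decide_eq_true h3
  · intro h tn htn
    apply decide_eq_true
    apply h
    · omega
    · omega

-- the tables the two ports build, as total functions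
def pvDpT (X : Int → Int → Prop) [∀ i j, Decidable (X i j)] (N : Int) : Int × Int → Int × Int :=
  fun p => if 1 ≤ p.1 ∧ p.1 ≤ N ∧ 1 ≤ p.2 ∧ p.2 ≤ N
    then (pvUpI X (p.1 - 1) (p.2 - 1), pvLeftI X (p.1 - 1) (p.2 - 1)) else (0, 0)

def pvRowT (X : Int → Int → Prop) [∀ i j, Decidable (X i j)] (N : Int) : Int × Int → Int :=
  fun p => if 0 ≤ p.1 ∧ p.1 < N ∧ 1 ≤ p.2 ∧ p.2 ≤ N
    then pvPsum (fun j => if X p.1 j then 1 else 0) p.2.toNat else 0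

def pvColT (X : Int → Int → Prop) [∀ i j, Decidable (X i j)] (N : Int) : Int × Int → Int :=
  fun p => if 0 ≤ p.1 ∧ p.1 < N ∧ 1 ≤ p.2 ∧ p.2 ≤ N
    then pvPsum (fun i => if X i p.1 then 1 else 0) p.2.toNat else 0

lemma pvRowT_val (X : Int → Int → Prop) [∀ i j, Decidable (X i j)] (N i j : Int)
    (h1 : 0 ≤ i) (h2 : i < N) (h3 : 0 ≤ j) (h4 : j ≤ N) :
    pvRowT X N (i, j) = pvPsum (fun j' => if X i j' then 1 else 0) j.toNat := by
  unfold pvRowT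
  by_cases h : 1 ≤ j
  · rw [if_pos ⟨h1, h2, h, h4⟩]
  · rw [if_neg (by omega)]
    have hj : j = 0 := by omega
    subst hj
    rfl

lemma pvColT_val (X : Int → Int → Prop) [∀ i j, Decidable (X i j)] (N i j : Int)
    (h1 : 0 ≤ i) (h2 : i < N) (h3 : 0 ≤ j) (h4 : j ≤ N) :
    pvColT X N (i, j) = pvPsum (fun i' => if X i' i then 1 else 0) j.toNat := by
  unfold pvColT
  by_cases h : 1 ≤ j
  · rw [if_pos ⟨h1, h2, h, h4⟩]
  · rw [if_neg (by omega)]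
    have hj : j = 0 := by omega
    subst hj
    rfl

-- the value port A computes, over the abstract table
def pvAVal (X : Int → Int → Prop) [∀ i j, Decidable (X i j)] (N : Nat) : Int :=
  (PySem.List.pyRange (↑N) 0 (-1)).foldl (fun maxi i =>
    (PySem.List.pyRange (↑N) 0 (-1)).foldl (fun maxi j =>
      pvAWhile (pvDpT X (↑N)) i j
        (min ((pvDpT X (↑N)) (i, j)).1 ((pvDpT X (↑N)) (i, j)).2) maxi) maxi) 0

-- the value port B computes, over the abstract tables
def pvBVal (X : Int → Int → Prop) [∀ i j, Decidable (X i j)] (N : Nat) : Int :=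
  (PySem.List.pyRange 0 (↑N) 1).foldl (fun best i =>
    (PySem.List.pyRange 0 (↑N) 1).foldl (fun best j =>
      (PySem.List.pyRange (best + 1) (min ((↑N : Int) - i) ((↑N : Int) - j) + 1) 1).foldl (fun best k =>
        if pvRowT X (↑N) (i, j + k) - pvRowT X (↑N) (i, j) = k ∧
           pvRowT X (↑N) (i + k - 1, j + k) - pvRowT X (↑N) (i + k - 1, j) = k ∧
           pvColT X (↑N) (j, i + k) - pvColT X (↑N) (j, i) = k ∧
           pvColT X (↑N) (j + k - 1, i + k) - pvColT X (↑N) (j + k - 1, i) = k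
        then k else best) best) best) 0

lemma pvAside (X : Int → Int → Prop) [∀ i j, Decidable (X i j)] (N : Nat) :
    0 ≤ pvAVal X N ∧ (pvAVal X N = 0 ∨ pvGood X (↑N) (pvAVal X N)) ∧
      (∀ k : Int, pvGood X (↑N) k → k ≤ pvAVal X N) := by
  unfold pvAVal
  rw [pvFoldFlat]
  set D := pvDpT X ((N : Nat) : Int) with hD
  set L := (PySem.List.pyRange ((N : Nat) : Int) 0 (-1)).flatMap
      (fun i => (PySem.List.pyRange ((N : Nat) : Int) 0 (-1)).map (fun j => (i, j))) with hL
  have hmem : ∀ p : Int × Int, p ∈ L ↔ 1 ≤ p.1 ∧ p.1 ≤ (N : Int) ∧ 1 ≤ p.2 ∧ p.2 ≤ (N : Int) := by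
    intro p
    rw [hL]
    simp only [List.mem_flatMap, List.mem_map, PySem.List.mem_pyRange_neg_one]
    constructor
    · rintro ⟨i, ⟨hi1, hi2⟩, j, ⟨hj1, hj2⟩, rfl⟩
      exact ⟨hi1, hi2, hj1, hj2⟩
    · rintro ⟨h1, h2, h3, h4⟩
      exact ⟨p.1, ⟨h1, h2⟩, p.2, ⟨h3, h4⟩, rfl⟩
  have hDval : ∀ I J : Int, 1 ≤ I → I ≤ (N : Int) → 1 ≤ J → J ≤ (N : Int) →
      D (I, J) = (pvUpI X (I - 1) (J - 1), pvLeftI X (I - 1) (J - 1)) := by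
    intro I J h1 h2 h3 h4
    rw [hD]
    unfold pvDpT
    rw [if_pos ⟨h1, h2, h3, h4⟩]
  have hcond : ∀ I J c : Int, 1 ≤ I → I ≤ (N : Int) → 1 ≤ J → J ≤ (N : Int) → 1 ≤ c →
      ((c ≤ min (D (I, J)).1 (D (I, J)).2 ∧ (D (I - c + 1, J)).2 ≥ c ∧ (D (I, J - c + 1)).1 ≥ c)
        ↔ (c ≤ I ∧ c ≤ J ∧ pvBdr X (I - c) (J - c) c)) := by
    intro I J c h1 h2 h3 h4 hc
    constructor
    · rintro ⟨hmin, hd1, hd2⟩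
      rw [hDval I J h1 h2 h3 h4] at hmin
      have hup := (pvUpI_ge X (I - 1) (J - 1) c (by omega) (by omega)).1
        (le_trans hmin (min_le_left _ _))
      have hleft := (pvLeftI_ge X (I - 1) (J - 1) c (by omega) (by omega)).1
        (le_trans hmin (min_le_right _ _))
      have hcI : c ≤ I := by omega
      have hcJ : c ≤ J := by omega
      rw [hDval (I - c + 1) J (by omega) (by omega) h3 h4] at hd1
      rw [hDval I (J - c + 1) h1 h2 (by omega) (by omega)] at hd2
      have htop := (pvLeftI_ge X (I - c + 1 - 1) (J - 1) c (by omega) (by omega)).1 hd1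
      have hlc := (pvUpI_ge X (I - 1) (J - c + 1 - 1) c (by omega) (by omega)).1 hd2
      obtain ⟨-, htop⟩ := htop
      obtain ⟨-, hlc⟩ := hlc
      obtain ⟨-, hup⟩ := hup
      obtain ⟨-, hleft⟩ := hleft
      rw [show I - c + 1 - 1 = I - c by ring, show J - 1 + 1 - c = J - c by ring] at htop
      rw [show I - 1 + 1 - c = I - c by ring, show J - c + 1 - 1 = J - c by ring] at hlc
      rw [show I - 1 + 1 - c = I - c by ring] at hup
      rw [show J - 1 + 1 - c = J - c by ring] at hleft
      refine ⟨hcI, hcJ, htop, ?_, hlc, ?_⟩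
      · rw [show I - c + c - 1 = I - 1 by ring]
        exact hleft
      · rw [show J - c + c - 1 = J - 1 by ring]
        exact hup
    · rintro ⟨hcI, hcJ, hb1, hb2, hb3, hb4⟩
      rw [show I - c + c - 1 = I - 1 by ring] at hb2
      rw [show J - c + c - 1 = J - 1 by ring] at hb4
      refine ⟨?_, ?_, ?_⟩
      · rw [hDval I J h1 h2 h3 h4]
        refine le_min ?_ ?_
        · apply (pvUpI_ge X (I - 1) (J - 1) c (by omega) (by omega)).2
          refine ⟨by omega, ?_⟩
          rw [show I - 1 + 1 - c = I - c by ring]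
          exact hb4
        · apply (pvLeftI_ge X (I - 1) (J - 1) c (by omega) (by omega)).2
          refine ⟨by omega, ?_⟩
          rw [show J - 1 + 1 - c = J - c by ring]
          exact hb2
      · rw [hDval (I - c + 1) J (by omega) (by omega) h3 h4]
        apply (pvLeftI_ge X (I - c + 1 - 1) (J - 1) c (by omega) (by omega)).2
        refine ⟨by omega, ?_⟩
        rw [show I - c + 1 - 1 = I - c by ring, show J - 1 + 1 - c = J - c by ring]
        exact hb1
      · rw [hDval I (J - c + 1) h1 h2 (by omega) (by omega)]
        apply (pvUpI_ge X (I - 1) (J - c + 1 - 1) c (by omega) (by omega)).2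
        refine ⟨by omega, ?_⟩
        rw [show I - 1 + 1 - c = I - c by ring, show J - c + 1 - 1 = J - c by ring]
        exact hb3
  have hstep : ∀ (acc : Int) (p : Int × Int), p ∈ L →
      (0 ≤ acc ∧ (acc = 0 ∨ pvGood X (↑N) acc)) →
      (0 ≤ pvAWhile D p.1 p.2 (min (D (p.1, p.2)).1 (D (p.1, p.2)).2) acc ∧
        (pvAWhile D p.1 p.2 (min (D (p.1, p.2)).1 (D (p.1, p.2)).2) acc = 0 ∨
          pvGood X (↑N) (pvAWhile D p.1 p.2 (min (D (p.1, p.2)).1 (D (p.1, p.2)).2) acc))) := by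
    rintro acc p hp ⟨ha0, hs⟩
    obtain ⟨h1, h2, h3, h4⟩ := (hmem p).1 hp
    obtain ⟨c1, c2, c3⟩ := pvAWhile_char D p.1 p.2 (min (D (p.1, p.2)).1 (D (p.1, p.2)).2) acc
    refine ⟨by omega, ?_⟩
    rcases c2 with heq | ⟨hgt, hle, hcd1, hcd2⟩
    · rw [heq]
      exact hs
    · right
      have hr1 : 1 ≤ pvAWhile D p.1 p.2 (min (D (p.1, p.2)).1 (D (p.1, p.2)).2) acc := by omega
      have hb := (hcond p.1 p.2 _ h1 h2 h3 h4 hr1).1 ⟨hle, hcd1, hcd2⟩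
      exact ⟨hr1, p.1 - _, p.2 - _, by omega, by omega, by omega, by omega, hb.2.2⟩
  obtain ⟨hnn, hsound⟩ := pvFoldInv L
    (fun acc p => pvAWhile D p.1 p.2 (min (D (p.1, p.2)).1 (D (p.1, p.2)).2) acc) 0
    (fun acc => 0 ≤ acc ∧ (acc = 0 ∨ pvGood X (↑N) acc)) ⟨le_refl 0, Or.inl rfl⟩ hstep
  refine ⟨hnn, hsound, ?_⟩
  intro k hg
  obtain ⟨hk1, i0, j0, h0i, h0j, hiN, hjN, hB⟩ := hg
  apply pvFoldGe L _ 0 (i0 + k, j0 + k) k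
  · exact (hmem _).2 ⟨by omega, by omega, by omega, by omega⟩
  · intro acc
    obtain ⟨c1, c2, c3⟩ := pvAWhile_char D (i0 + k) (j0 + k)
      (min (D (i0 + k, j0 + k)).1 (D (i0 + k, j0 + k)).2) acc
    by_cases hacc : k ≤ acc
    · exact le_trans hacc c1
    · have hiff := (hcond (i0 + k) (j0 + k) k (by omega) (by omega) (by omega) (by omega) hk1).2
        ⟨by omega, by omega, by
          rw [show i0 + k - k = i0 by ring, show j0 + k - k = j0 by ring]
          exact hB⟩
      exact c3 k (by omega) hiff.1 hiff.2.1 hiff.2.2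
  · exact fun acc y _ => (pvAWhile_char D y.1 y.2 _ acc).1

lemma pvRow_seg (X : Int → Int → Prop) [∀ i j, Decidable (X i j)] (N r a k : Int)
    (h1 : 0 ≤ r) (h2 : r < N) (h3 : 0 ≤ a) (h4 : 1 ≤ k) (h5 : a + k ≤ N) :
    (pvRowT X N (r, a + k) - pvRowT X N (r, a) = k) ↔ pvHseg X r a k := by
  rw [pvRowT_val X N r (a + k) h1 h2 (by omega) (by omega),
      pvRowT_val X N r a h1 h2 h3 (by omega)]
  have hiff := pvPsum_seg (X r) a (a + k) h3 (by omega)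
  rw [show a + k - a = k by ring] at hiff
  rw [hiff]
  unfold pvHseg
  constructor
  · intro h t ht0 htk
    exact h (a + t) (by omega) (by omega)
  · intro h t ht1 ht2
    have h6 := h (t - a) (by omega) (by omega)
    rwa [show a + (t - a) = t by ring] at h6

lemma pvCol_seg (X : Int → Int → Prop) [∀ i j, Decidable (X i j)] (N c a k : Int)
    (h1 : 0 ≤ c) (h2 : c < N) (h3 : 0 ≤ a) (h4 : 1 ≤ k) (h5 : a + k ≤ N) :
    (pvColT X N (c, a + k) - pvColT X N (c, a) = k) ↔ pvVseg X a c k := by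
  rw [pvColT_val X N c (a + k) h1 h2 (by omega) (by omega),
      pvColT_val X N c a h1 h2 h3 (by omega)]
  have hiff := pvPsum_seg (fun i' => X i' c) a (a + k) h3 (by omega)
  rw [show a + k - a = k by ring] at hiff
  rw [hiff]
  unfold pvVseg
  constructor
  · intro h t ht0 htk
    exact h (a + t) (by omega) (by omega)
  · intro h t ht1 ht2
    have h6 := h (t - a) (by omega) (by omega)
    rwa [show a + (t - a) = t by ring] at h6

lemma pvBside (X : Int → Int → Prop) [∀ i j, Decidable (X i j)] (N : Nat) :
    0 ≤ pvBVal X N ∧ (pvBVal X N = 0 ∨ pvGood X (↑N) (pvBVal X N)) ∧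
      (∀ k : Int, pvGood X (↑N) k → k ≤ pvBVal X N) := by
  unfold pvBVal
  rw [pvFoldFlat]
  set L := (PySem.List.pyRange 0 ((N : Nat) : Int) 1).flatMap
      (fun i => (PySem.List.pyRange 0 ((N : Nat) : Int) 1).map (fun j => (i, j))) with hL
  have hmem : ∀ p : Int × Int, p ∈ L ↔ 0 ≤ p.1 ∧ p.1 < (N : Int) ∧ 0 ≤ p.2 ∧ p.2 < (N : Int) := by
    intro p
    rw [hL]
    simp only [List.mem_flatMap, List.mem_map, PySem.List.mem_pyRange_one]
    constructor
    · rintro ⟨i, ⟨hi1, hi2⟩, j, ⟨hj1, hj2⟩, rfl⟩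
      exact ⟨hi1, hi2, hj1, hj2⟩
    · rintro ⟨h1, h2, h3, h4⟩
      exact ⟨p.1, ⟨h1, h2⟩, p.2, ⟨h3, h4⟩, rfl⟩
  have hQ : ∀ i j k : Int, 0 ≤ i → i < (N : Int) → 0 ≤ j → j < (N : Int) → 1 ≤ k →
      i + k ≤ (N : Int) → j + k ≤ (N : Int) →
      ((pvRowT X (↑N) (i, j + k) - pvRowT X (↑N) (i, j) = k ∧
        pvRowT X (↑N) (i + k - 1, j + k) - pvRowT X (↑N) (i + k - 1, j) = k ∧
        pvColT X (↑N) (j, i + k) - pvColT X (↑N) (j, i) = k ∧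
        pvColT X (↑N) (j + k - 1, i + k) - pvColT X (↑N) (j + k - 1, i) = k) ↔ pvBdr X i j k) := by
    intro i j k h1 h2 h3 h4 hk hik hjk
    rw [pvRow_seg X (↑N) i j k h1 h2 h3 hk hjk,
        pvRow_seg X (↑N) (i + k - 1) j k (by omega) (by omega) h3 hk hjk,
        pvCol_seg X (↑N) j i k h3 h4 h1 hk hik,
        pvCol_seg X (↑N) (j + k - 1) i k (by omega) (by omega) h1 hk hik]
    unfold pvBdr
    tauto
  have hstep : ∀ (acc : Int) (p : Int × Int), p ∈ L →
      (0 ≤ acc ∧ (acc = 0 ∨ pvGood X (↑N) acc)) →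
      (0 ≤ ((PySem.List.pyRange (acc + 1) (min ((↑N : Int) - p.1) ((↑N : Int) - p.2) + 1) 1).foldl
          (fun best k => if pvRowT X (↑N) (p.1, p.2 + k) - pvRowT X (↑N) (p.1, p.2) = k ∧
            pvRowT X (↑N) (p.1 + k - 1, p.2 + k) - pvRowT X (↑N) (p.1 + k - 1, p.2) = k ∧
            pvColT X (↑N) (p.2, p.1 + k) - pvColT X (↑N) (p.2, p.1) = k ∧
            pvColT X (↑N) (p.2 + k - 1, p.1 + k) - pvColT X (↑N) (p.2 + k - 1, p.1) = k
            then k else best) acc) ∧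
        (((PySem.List.pyRange (acc + 1) (min ((↑N : Int) - p.1) ((↑N : Int) - p.2) + 1) 1).foldl
          (fun best k => if pvRowT X (↑N) (p.1, p.2 + k) - pvRowT X (↑N) (p.1, p.2) = k ∧
            pvRowT X (↑N) (p.1 + k - 1, p.2 + k) - pvRowT X (↑N) (p.1 + k - 1, p.2) = k ∧
            pvColT X (↑N) (p.2, p.1 + k) - pvColT X (↑N) (p.2, p.1) = k ∧
            pvColT X (↑N) (p.2 + k - 1, p.1 + k) - pvColT X (↑N) (p.2 + k - 1, p.1) = k
            then k else best) acc) = 0 ∨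
          pvGood X (↑N) ((PySem.List.pyRange (acc + 1) (min ((↑N : Int) - p.1) ((↑N : Int) - p.2) + 1) 1).foldl
          (fun best k => if pvRowT X (↑N) (p.1, p.2 + k) - pvRowT X (↑N) (p.1, p.2) = k ∧
            pvRowT X (↑N) (p.1 + k - 1, p.2 + k) - pvRowT X (↑N) (p.1 + k - 1, p.2) = k ∧
            pvColT X (↑N) (p.2, p.1 + k) - pvColT X (↑N) (p.2, p.1) = k ∧
            pvColT X (↑N) (p.2 + k - 1, p.1 + k) - pvColT X (↑N) (p.2 + k - 1, p.1) = k
            then k else best) acc))) := by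
    rintro acc p hp ⟨ha0, hs⟩
    obtain ⟨h1, h2, h3, h4⟩ := (hmem p).1 hp
    obtain ⟨c1, c2, c3⟩ := pvBScan_char
      (fun k => pvRowT X (↑N) (p.1, p.2 + k) - pvRowT X (↑N) (p.1, p.2) = k ∧
        pvRowT X (↑N) (p.1 + k - 1, p.2 + k) - pvRowT X (↑N) (p.1 + k - 1, p.2) = k ∧
        pvColT X (↑N) (p.2, p.1 + k) - pvColT X (↑N) (p.2, p.1) = k ∧
        pvColT X (↑N) (p.2 + k - 1, p.1 + k) - pvColT X (↑N) (p.2 + k - 1, p.1) = k)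
      (acc + 1) (min ((↑N : Int) - p.1) ((↑N : Int) - p.2) + 1) acc (by omega)
    refine ⟨by omega, ?_⟩
    rcases c2 with heq | ⟨hge, hlt, hQr⟩
    · rw [heq]
      exact hs
    · right
      refine ⟨by omega, p.1, p.2, h1, h3, by omega, by omega, ?_⟩
      exact (hQ p.1 p.2 _ h1 h2 h3 h4 (by omega) (by omega) (by omega)).1 hQr
  obtain ⟨hnn, hsound⟩ := pvFoldInv L _ 0
    (fun acc => 0 ≤ acc ∧ (acc = 0 ∨ pvGood X (↑N) acc)) ⟨le_refl 0, Or.inl rfl⟩ hstep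
  refine ⟨hnn, hsound, ?_⟩
  intro k hg
  obtain ⟨hk1, i0, j0, h0i, h0j, hiN, hjN, hB⟩ := hg
  apply pvFoldGe L _ 0 (i0, j0) k
  · exact (hmem _).2 ⟨by omega, by omega, by omega, by omega⟩
  · intro acc
    obtain ⟨c1, c2, c3⟩ := pvBScan_char
      (fun k => pvRowT X (↑N) (i0, j0 + k) - pvRowT X (↑N) (i0, j0) = k ∧
        pvRowT X (↑N) (i0 + k - 1, j0 + k) - pvRowT X (↑N) (i0 + k - 1, j0) = k ∧
        pvColT X (↑N) (j0, i0 + k) - pvColT X (↑N) (j0, i0) = k ∧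
        pvColT X (↑N) (j0 + k - 1, i0 + k) - pvColT X (↑N) (j0 + k - 1, i0) = k)
      (acc + 1) (min ((↑N : Int) - i0) ((↑N : Int) - j0) + 1) acc (by omega)
    by_cases hacc : k ≤ acc
    · exact le_trans hacc c1
    · refine c3 k (by omega) (by omega) ?_
      exact (hQ i0 j0 k (by omega) (by omega) (by omega) (by omega) hk1 hiN hjN).2 hB
  · exact fun acc y _ => (pvBScan_char _ (acc + 1) _ acc (by omega)).1

-- ===== VERDICT (by name: the statement is the Claim_ definition above) =====
theorem largestSubsquare_spec : Claim_equal_largestSubsquare := by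
  intro n a _hdom hpre
  unfold Spec_largestSubsquare
  obtain ⟨hne, hdisj⟩ := hpre
  have hhead : (PySem.List.pyGet? a 0).getD [] = a.head?.getD [] := by
    cases a with
    | nil => exact absurd rfl hne
    | cons x xs => simp [PySem.List.pyGet?, PySem.List.pyIdx?]
  rcases hdisj with h0 | ⟨hsq, hrows⟩
  · -- empty first row: both sides run no inner iteration and return 0
    have hlen0 : ((PySem.List.pyGet? a 0).getD []).length = 0 := by rw [hhead]; exact h0
    have hr1 : PySem.List.pyRange 0 ((0 : Nat) : Int) 1 = [] :=
      PySem.List.pyRange_one_eq_nil (by simp)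
    have hr2 : PySem.List.pyRange ((0 : Nat) : Int) 0 (-1) = [] := by decide
    have hA : largestSubsquare n a = 0 := by
      simp only [largestSubsquare, hlen0, hr1, hr2, List.foldl_nil]
      rw [pvFoldlConst]
    have hB : largestSubsquare_alt n a = 0 := by
      simp only [largestSubsquare_alt, hlen0, hr1, List.foldl_nil]
      rw [pvFoldlConst]
    rw [hA, hB]
  · -- square grid: both sides compute the size of the largest X-bordered square
    have hlen0 : ((PySem.List.pyGet? a 0).getD []).length = a.length := by rw [hhead]; exact hsq
    have eA : largestSubsquare n a = pvAVal (fun i j => pvCell a i j = "X") a.length := by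
      simp only [largestSubsquare, pvAVal]
      rw [hlen0]
      have hdp := funext (fun p => pvFillDp a.length (fun i j => pvCell a i j = "X") p)
      rw [hdp]
      rfl
    have eB : largestSubsquare_alt n a = pvBVal (fun i j => pvCell a i j = "X") a.length := by
      simp only [largestSubsquare_alt, pvBVal]
      rw [hlen0]
      have hrowF := funext (fun p => pvFill a.length a.length
        (fun i j => if pvCell a i j = "X" then (1 : Int) else 0) p)
      have hcolF := funext (fun p => pvFill a.length a.length
        (fun j i => if pvCell a i j = "X" then (1 : Int) else 0) p)
      rw [hrowF, hcolF]
      rfl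
    rw [eA, eB]
    exact pvUnique (fun i j => pvCell a i j = "X") (↑a.length) _ _
      (pvAside (fun i j => pvCell a i j = "X") a.length)
      (pvBside (fun i j => pvCell a i j = "X") a.length)
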